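-- pv_equiv track=rewrite | github.com/pabloschwarzenberg/grader | tema2_ej2/tema2_ej2_677690f216f0ade809866f5f12c25cb9.py | amigos
-- ===== SOURCE A (Python) =====
-- def amigos(lista,lista1):
--   l=[]
--   suma=0
--   for i in lista:
--       for j in range(1,i):
--           for k in lista1:
--               if i%j==0:
--                   suma+=k
--                   l.append(i)
--                   l.append(k)
--   return l
-- ===== SOURCE B (Python) =====
-- def amigos(lista, lista1):
--     if not lista1:
--         return []
--     l = []
--     for i in lista:
--         c = sum(1 for j in range(1, i) if i % j == 0)
--         if c != 0:
--             block = [x for k in lista1 for x in (i, k)]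
--             l += block * c
--     return l
-- ===== Notes on version B (the rewrite author's own statement) =====
-- stated objective: alternative
-- what changed: B returns [] at once when lista1 is empty and otherwise counts the proper divisors of each i in a single pass (no lista1 scan inside the divisor test), then appends the interleaved [i,k] block replicated that many times, replacing A's triple nested loop.
import Mathlib
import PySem

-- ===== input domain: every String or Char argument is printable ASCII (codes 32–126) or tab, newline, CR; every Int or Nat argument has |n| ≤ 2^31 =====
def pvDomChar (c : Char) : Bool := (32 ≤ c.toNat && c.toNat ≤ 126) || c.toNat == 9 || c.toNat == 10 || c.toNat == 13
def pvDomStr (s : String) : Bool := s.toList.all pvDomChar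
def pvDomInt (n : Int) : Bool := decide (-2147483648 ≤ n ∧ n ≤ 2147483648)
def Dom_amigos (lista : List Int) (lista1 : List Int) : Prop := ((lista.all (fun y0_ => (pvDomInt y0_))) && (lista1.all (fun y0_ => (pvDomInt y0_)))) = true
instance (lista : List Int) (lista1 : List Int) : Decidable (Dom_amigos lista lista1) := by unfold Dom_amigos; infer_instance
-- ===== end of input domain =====

-- B returns [] immediately when lista1 is empty, otherwise counts the proper divisors of each i once and appends the interleaved (i,k) block replicated that many times, removing A's inner scan of lista1 per divisor candidate.
-- ===== PORT A =====
def amigos (lista : List Int) (lista1 : List Int) : List Int :=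
  (lista.foldl (fun (st : List Int × Int) i =>
      (PySem.List.pyRange 1 i 1).foldl (fun st j =>
        lista1.foldl (fun (st : List Int × Int) k =>
          if PySem.Int.mod i j = 0 then (st.1 ++ [i] ++ [k], st.2 + k) else st) st) st)
    (([] : List Int), (0 : Int))).1

-- ===== PORT B =====
def amigos_alt (lista : List Int) (lista1 : List Int) : List Int :=
  if lista1.isEmpty then []
  else
    lista.foldl (fun l i =>
      let c := ((PySem.List.pyRange 1 i 1).filter (fun j => PySem.Int.mod i j == 0)).length
      if c ≠ 0 then
        let block := lista1.flatMap (fun k => [i, k])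
        l ++ (List.replicate c block).flatten
      else l) []

-- ===== PRECONDITION & SPEC =====
def Spec_amigos (lista : List Int) (lista1 : List Int) (out : List Int) : Prop := out = amigos_alt lista lista1
instance (lista : List Int) (lista1 : List Int) (out : List Int) : Decidable (Spec_amigos lista lista1 out) := by unfold Spec_amigos; infer_instance

-- ===== CLAIM (what is proved, stated in full; the proofs are below) =====
def Claim_equal_amigos : Prop := ∀ (lista : List Int) (lista1 : List Int), Dom_amigos lista lista1 → Spec_amigos lista lista1 (amigos lista lista1)

-- ===== LEMMAS AND PROOFS =====

-- inner k-loop of A when the divisor test holds: appends the full interleaved block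
theorem innerA_true (i j : Int) (lista1 : List Int) (h : PySem.Int.mod i j = 0)
    (st : List Int × Int) :
    (lista1.foldl (fun (st : List Int × Int) k =>
        if PySem.Int.mod i j = 0 then (st.1 ++ [i] ++ [k], st.2 + k) else st) st).1
      = st.1 ++ lista1.flatMap (fun k => [i, k]) := by
  induction lista1 generalizing st with
  | nil => simp
  | cons k rest ih =>
      simp only [List.foldl_cons]
      rw [if_pos h, ih]
      simp

theorem innerA_false (i j : Int) (lista1 : List Int) (h : ¬ PySem.Int.mod i j = 0)
    (st : List Int × Int) :
    (lista1.foldl (fun (st : List Int × Int) k =>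
        if PySem.Int.mod i j = 0 then (st.1 ++ [i] ++ [k], st.2 + k) else st) st) = st := by
  induction lista1 generalizing st with
  | nil => rfl
  | cons k rest ih => simp only [List.foldl_cons]; rw [if_neg h]; exact ih st

-- j-loop of A over any list of candidate divisors
theorem midA (i : Int) (lista1 : List Int) (L : List Int) (st : List Int × Int) :
    ((L.foldl (fun st j =>
        lista1.foldl (fun (st : List Int × Int) k =>
          if PySem.Int.mod i j = 0 then (st.1 ++ [i] ++ [k], st.2 + k) else st) st) st).1)
      = st.1 ++ (List.replicate ((L.filter (fun j => PySem.Int.mod i j == 0)).length)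
          (lista1.flatMap (fun k => [i, k]))).flatten := by
  induction L generalizing st with
  | nil => simp
  | cons j rest ih =>
      simp only [List.foldl_cons, List.filter_cons]
      by_cases h : PySem.Int.mod i j = 0
      · have hb : (PySem.Int.mod i j == 0) = true := by simp [h]
        rw [ih, innerA_true i j lista1 h st]
        simp [hb, List.replicate_succ, List.append_assoc]
      · have hb : (PySem.Int.mod i j == 0) = false := by simp [h]
        rw [innerA_false i j lista1 h st, ih]
        simp [hb]

theorem outer (lista lista1 : List Int) (st : List Int × Int) :
    (lista.foldl (fun (st : List Int × Int) i =>
      (PySem.List.pyRange 1 i 1).foldl (fun st j =>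
        lista1.foldl (fun (st : List Int × Int) k =>
          if PySem.Int.mod i j = 0 then (st.1 ++ [i] ++ [k], st.2 + k) else st) st) st) st).1
    = lista.foldl (fun l i =>
        let c := ((PySem.List.pyRange 1 i 1).filter (fun j => PySem.Int.mod i j == 0)).length
        if c ≠ 0 then
          let block := lista1.flatMap (fun k => [i, k])
          l ++ (List.replicate c block).flatten
        else l) st.1 := by
  induction lista generalizing st with
  | nil => rfl
  | cons i rest ih =>
      simp only [List.foldl_cons]
      rw [ih]
      congr 1
      rw [midA]
      by_cases hc : ((PySem.List.pyRange 1 i 1).filter (fun j => PySem.Int.mod i j == 0)).length = 0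
      · simp [hc]
      · simp [hc]

-- a fold whose step ignores the element and returns the state is the identity
theorem foldl_const {α β : Type} (L : List α) (s : β) : L.foldl (fun s _ => s) s = s := by
  induction L generalizing s with
  | nil => rfl
  | cons x r ih => simp only [List.foldl_cons]; exact ih s

-- ===== VERDICT (by name: the statement is the Claim_ definition above) =====
theorem amigos_spec : Claim_equal_amigos := by
  intro lista lista1 _
  unfold Spec_amigos amigos amigos_alt
  by_cases he : lista1 = []
  · subst he
    simp [foldl_const]
  · rw [if_neg (by simpa using he)]
    exact outer lista lista1 ([], 0)
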